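-- pv_equiv track=rewrite | github.com/LeenChoi/algorithm | al/al-201.py | checkBit
-- ===== SOURCE A (Python) =====
-- def checkBit(m, n):
--     for i in range(1, 31):
--         if m < 2 ** i:
--             if n < 2 ** i:
--                 if i == 1:
--                     return 0
--                 else:
--                     return 2 ** (i - 1)
--             else:
--                 return 0
-- ===== SOURCE B (Python) =====
-- def checkBit(m, n):
--     if m < 2:
--         return 0
--     i = m.bit_length()
--     if i > 30:
--         return None
--     return 2 ** (i - 1) if n < 2 ** i else 0
-- ===== Notes on version B (the rewrite author's own statement) =====
-- stated objective: idiomatic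
-- what changed: Replaces the 30-iteration linear search for the first power of two above m with a closed-form bit_length computation and a single branch.
-- outside the precondition, e.g. on checkBit(1073741824, 5): A returns None, B returns None
import Mathlib
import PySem

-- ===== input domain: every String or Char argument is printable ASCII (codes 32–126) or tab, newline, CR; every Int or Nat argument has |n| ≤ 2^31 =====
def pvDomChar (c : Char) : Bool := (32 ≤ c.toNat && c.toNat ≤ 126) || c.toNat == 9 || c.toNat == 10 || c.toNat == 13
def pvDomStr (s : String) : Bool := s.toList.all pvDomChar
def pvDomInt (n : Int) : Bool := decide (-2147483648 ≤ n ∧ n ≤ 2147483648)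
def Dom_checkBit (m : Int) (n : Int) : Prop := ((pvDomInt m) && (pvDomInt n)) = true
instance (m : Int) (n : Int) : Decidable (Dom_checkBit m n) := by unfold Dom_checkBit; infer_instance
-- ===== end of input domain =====

-- B replaces A's 30-step linear search for the first power of two above m with a
-- closed-form bit_length computation and a single branch (idiomatic, O(1)).


-- ===== PORT A =====
-- the for-loop with early return, over range(1, 31)
def checkBitLoop (m : Int) (n : Int) : List Int → Option Int
  | [] => none
  | i :: rest =>
      if m < 2 ^ i.toNat then
        (if n < 2 ^ i.toNat then
          (if i = 1 then some 0 else some (2 ^ (i - 1).toNat))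
        else some 0)
      else checkBitLoop m n rest

-- falling off the loop is Python's `return None` (outside Pre_checkBit); .getD 0 only fills the type
def checkBit (m : Int) (n : Int) : Int :=
  (checkBitLoop m n (PySem.List.pyRange 1 31 1)).getD 0

-- ===== PORT B =====
-- m.bit_length() for m ≥ 1 is Nat.log2 + 1; the `i > 30` branch is Python's `return None`
-- (outside Pre_checkBit), 0 only fills the type
def checkBit_alt (m : Int) (n : Int) : Int :=
  if m < 2 then 0
  else
    let i : Nat := m.toNat.log2 + 1
    if 30 < i then 0
    else if n < 2 ^ i then 2 ^ (i - 1) else 0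

-- ===== PRECONDITION & SPEC =====
-- Pre_ excludes m ≥ 2^30, where A falls off the loop and returns None (not an int).
def Pre_checkBit (m : Int) (n : Int) : Prop := m < 1073741824
instance (m : Int) (n : Int) : Decidable (Pre_checkBit m n) := by unfold Pre_checkBit; infer_instance
def pvWitness_checkBit : Int × Int := (12, 7)

def Spec_checkBit (m : Int) (n : Int) (out : Int) : Prop := out = checkBit_alt m n
instance (m : Int) (n : Int) (out : Int) : Decidable (Spec_checkBit m n out) := by unfold Spec_checkBit; infer_instance

-- ===== CLAIM (what is proved, stated in full; the proofs are below) =====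
def Claim_equal_checkBit : Prop := ∀ (m : Int) (n : Int), Dom_checkBit m n → Pre_checkBit m n → Spec_checkBit m n (checkBit m n)

-- ===== LEMMAS AND PROOFS =====

-- once enough range has been skipped, the loop stops at index i = bit_length m
theorem checkBitLoop_eq (m n : Int) (i : Nat) (hi2 : 2 ≤ i) (hi30 : i ≤ 30)
    (hlo : (2 : Int) ^ (i - 1) ≤ m) (hhi : m < 2 ^ i)
    (j : Nat) (hj1 : 1 ≤ j) (hji : j ≤ i) :
    checkBitLoop m n (PySem.List.pyRange (j : Int) 31 1) =
      some (if n < 2 ^ i then 2 ^ (i - 1) else 0) := by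
  have hj31 : (j : Int) < 31 := by omega
  rw [PySem.List.pyRange_one_cons hj31]
  by_cases hji' : j = i
  · subst hji'
    have hcond : m < 2 ^ ((j : Int)).toNat := by simpa using hhi
    have hne : ((j : Int)) ≠ 1 := by exact_mod_cast (by omega : (j : Int) ≠ 1)
    simp only [checkBitLoop, if_pos hcond, if_neg hne]
    have hexp : (((j : Int)) - 1).toNat = j - 1 := by omega
    split_ifs with hn hn' hn'
    · rw [hexp]
    · exact absurd (by simpa using hn) hn'
    · exact absurd (by simpa using hn') hn
    · rfl
  · have hjlt : j < i := lt_of_le_of_ne hji hji'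
    have hskip : ¬ m < 2 ^ ((j : Int)).toNat := by
      simp only [Int.toNat_natCast]
      have h1 : (2 : Int) ^ j ≤ 2 ^ (i - 1) := by
        apply pow_le_pow_right₀ (by norm_num) (by omega)
      omega
    simp only [checkBitLoop, if_neg hskip]
    have : ((j : Int)) + 1 = ((j + 1 : Nat) : Int) := by push_cast; ring
    rw [this]
    exact checkBitLoop_eq m n i hi2 hi30 hlo hhi (j + 1) (by omega) (by omega)
termination_by i - j

-- ===== VERDICT (by name: the statement is the Claim_ definition above) =====
theorem checkBit_spec : Claim_equal_checkBit := by
  intro m n _ hpre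
  unfold Spec_checkBit checkBit checkBit_alt Pre_checkBit at *
  by_cases hm2 : m < 2
  · -- first iteration fires with i = 1; both n-branches return 0
    rw [PySem.List.pyRange_one_cons (by norm_num)]
    have hcond : m < 2 ^ ((1 : Int)).toNat := by simpa using hm2
    simp only [checkBitLoop, if_pos hcond, if_pos hm2]
    split_ifs <;> rfl
  · rw [Int.not_lt] at hm2
    set M : Nat := m.toNat with hM
    have hM2 : 2 ≤ M := by omega
    have hMne : M ≠ 0 := by omega
    set i : Nat := M.log2 + 1 with hi
    have hlo' : 2 ^ M.log2 ≤ M := Nat.log2_self_le hMne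
    have hhi' : M < 2 ^ (M.log2 + 1) := Nat.lt_log2_self
    have hi2 : 2 ≤ i := by
      have : 1 ≤ M.log2 := (Nat.le_log2 hMne).mpr (by simpa using hM2)
      omega
    have hi30 : i ≤ 30 := by
      have hMlt : M < 2 ^ 30 := by omega
      have := (Nat.log2_lt hMne).mpr hMlt
      omega
    have hlo : (2 : Int) ^ (i - 1) ≤ m := by
      have : ((2 ^ M.log2 : Nat) : Int) ≤ (M : Int) := by exact_mod_cast hlo'
      have hMi : (M : Int) = m := by omega
      simpa [hi, hMi] using this
    have hhi : m < 2 ^ i := by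
      have : ((M : Int)) < ((2 ^ (M.log2 + 1) : Nat) : Int) := by exact_mod_cast hhi'
      have hMi : (M : Int) = m := by omega
      simpa [hi, hMi] using this
    have hloop := checkBitLoop_eq m n i hi2 hi30 hlo hhi 1 le_rfl (by omega)
    norm_num at hloop
    rw [hloop]
    simp only [Option.getD_some, if_neg (by omega : ¬ m < 2), if_neg (by omega : ¬ 30 < i)]
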